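-- pv_equiv track=rewrite | github.com/LoveeBaccus/CPTS_355 | NewLab3/Lab3.py | getMonthlyCases
-- ===== SOURCE A (Python) =====
-- def getMonthlyCases(data):
--     d = {}
--     for county, log in data.items():
--         for month, number in log.items():
--             if month not in d.keys():
--                 d[month] = {}
--             d[month][county] = number
--                 # add county and month to the month's log
--     return d
-- ===== SOURCE B (Python) =====
-- def getMonthlyCases(data):
--     # two-phase: collect all distinct months (first-appearance order), then
--     # build each month's column by scanning all counties for that month
--     months = list(dict.fromkeys(m for log in data.values() for m in log))
--     return {m: {c: log[m] for c, log in data.items() if m in log} for m in months}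
-- ===== Notes on version B (the rewrite author's own statement) =====
-- stated objective: alternative
-- what changed: A builds the transposed dict in one accumulating pass that mutates nested dicts entry by entry; B first collects the ordered set of distinct months and then builds each month's inner dict by a fresh comprehension scan over all counties; Pre_ excludes association lists with duplicate county or month keys, which do not represent Python dicts.
import Mathlib
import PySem

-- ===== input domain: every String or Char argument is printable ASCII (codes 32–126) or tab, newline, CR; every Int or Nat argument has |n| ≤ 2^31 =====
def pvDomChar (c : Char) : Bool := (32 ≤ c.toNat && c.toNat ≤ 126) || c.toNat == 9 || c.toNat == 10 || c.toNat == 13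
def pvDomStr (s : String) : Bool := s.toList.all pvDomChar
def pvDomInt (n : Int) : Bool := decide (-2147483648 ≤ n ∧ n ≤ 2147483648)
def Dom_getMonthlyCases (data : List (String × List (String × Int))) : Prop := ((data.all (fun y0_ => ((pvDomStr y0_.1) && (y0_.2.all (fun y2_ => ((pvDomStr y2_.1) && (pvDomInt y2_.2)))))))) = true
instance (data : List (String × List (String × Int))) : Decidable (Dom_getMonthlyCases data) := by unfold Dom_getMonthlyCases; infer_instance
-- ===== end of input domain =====

-- B replaces A's single accumulating pass (mutating nested dicts) by a two-phase
-- collect-the-months-then-scan-per-month construction (objective: alternative).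

-- ===== PORT A =====
-- inner-loop body of A: ensure d[month] exists, then d[month][county] = number
def pvStepA (county : String) (d : PySem.Dict String (PySem.Dict String Int))
    (mn : String × Int) : PySem.Dict String (PySem.Dict String Int) :=
  let d1 := if d.contains mn.1 then d else d.insert mn.1 PySem.Dict.empty
  d1.modify mn.1 PySem.Dict.empty (fun inner => inner.insert county mn.2)

def getMonthlyCases (data : List (String × List (String × Int))) : List (String × List (String × Int)) :=
  let d := data.foldl (fun d cl => cl.2.foldl (pvStepA cl.1) d) PySem.Dict.empty
  d.items.map (fun p => (p.1, p.2.items))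

-- ===== PORT B =====
def getMonthlyCases_alt (data : List (String × List (String × Int))) : List (String × List (String × Int)) :=
  let months := PySem.List.dedup (data.flatMap (fun cl => cl.2.map Prod.fst))
  months.map (fun m => (m, data.filterMap (fun cl =>
    ((PySem.Dict.mk cl.2).get? m).map (fun v => (cl.1, v)))))

-- ===== PRECONDITION & SPEC =====
-- Pre_ excludes association lists with duplicate county keys or duplicate month
-- keys inside a log: those do not represent Python dicts (A's argument and its
-- values are dicts, whose keys are necessarily distinct).
def Pre_getMonthlyCases (data : List (String × List (String × Int))) : Prop :=
  (data.map Prod.fst).Nodup ∧ ∀ p ∈ data, (p.2.map Prod.fst).Nodup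
instance (data : List (String × List (String × Int))) : Decidable (Pre_getMonthlyCases data) := by
  unfold Pre_getMonthlyCases; infer_instance

def pvWitness_getMonthlyCases : (List (String × List (String × Int))) :=
  [("A", [("Jan", 1), ("Feb", 2)]), ("B", [("Jan", 3)])]

def Spec_getMonthlyCases (data : List (String × List (String × Int))) (out : List (String × List (String × Int))) : Prop := out = getMonthlyCases_alt data
instance (data : List (String × List (String × Int))) (out : List (String × List (String × Int))) : Decidable (Spec_getMonthlyCases data out) := by unfold Spec_getMonthlyCases; infer_instance

-- ===== CLAIM (what is proved, stated in full; the proofs are below) =====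
def Claim_equal_getMonthlyCases : Prop := ∀ (data : List (String × List (String × Int))), Dom_getMonthlyCases data → Pre_getMonthlyCases data → Spec_getMonthlyCases data (getMonthlyCases data)

-- ===== LEMMAS AND PROOFS =====

-- B's per-month selection (definitionally the filterMap inside getMonthlyCases_alt)
def pvSel (data : List (String × List (String × Int))) (m : String) : List (String × Int) :=
  data.filterMap (fun cl => ((PySem.Dict.mk cl.2).get? m).map (fun v => (cl.1, v)))

-- keys of one inner-loop step of A
theorem keys_pvStepA (c : String) (d : PySem.Dict String (PySem.Dict String Int)) (mn : String × Int) :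
    (pvStepA c d mn).keys = PySem.Set.add d.keys mn.1 := by
  unfold pvStepA
  by_cases h : d.contains mn.1
  · simp only [h, if_pos, PySem.Dict.keys_modify]
    rw [PySem.Set.add_of_mem ((PySem.Dict.contains_iff_mem_keys d mn.1).1 h)]
    exact PySem.Dict.keys_insert_of_contains d _ h
  · have h' : d.contains mn.1 = false := by simpa using h
    simp only [h', Bool.false_eq_true, ite_false, PySem.Dict.keys_modify]
    rw [PySem.Dict.insert_insert_self, PySem.Dict.keys_insert_of_not_contains d _ h',
      PySem.Set.add_of_not_mem
        (fun hm => h ((PySem.Dict.contains_iff_mem_keys d mn.1).2 hm))]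

theorem getD_pvStepA (c m : String) (d : PySem.Dict String (PySem.Dict String Int)) (mn : String × Int) :
    (pvStepA c d mn).getD m PySem.Dict.empty =
      if m = mn.1 then (d.getD m PySem.Dict.empty).insert c mn.2
      else d.getD m PySem.Dict.empty := by
  unfold pvStepA
  by_cases h : d.contains mn.1
  · rw [if_pos h, PySem.Dict.getD_modify]
    by_cases hm : m = mn.1 <;> simp [hm]
  · have h' : d.contains mn.1 = false := by simpa using h
    simp only [h', Bool.false_eq_true, ite_false, PySem.Dict.getD_modify]
    by_cases hm : m = mn.1
    · subst hm
      simp [PySem.Dict.getD_insert_self, PySem.Dict.getD_of_not_contains d _ h']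
    · simp [hm, PySem.Dict.getD_insert_of_ne d _ _ hm]

-- keys of A's inner loop over one log
theorem keys_inner (c : String) (l : List (String × Int)) :
    ∀ d : PySem.Dict String (PySem.Dict String Int),
      (l.foldl (pvStepA c) d).keys = PySem.Set.update d.keys (l.map Prod.fst) := by
  induction l with
  | nil => intro d; simp [PySem.Set.update_nil]
  | cons p t ih =>
    intro d
    simp only [List.foldl_cons, List.map_cons, PySem.Set.update_cons, ih, keys_pvStepA]

-- keys of A's whole fold
theorem keys_outer (data : List (String × List (String × Int))) :
    ∀ d : PySem.Dict String (PySem.Dict String Int),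
      (data.foldl (fun d cl => cl.2.foldl (pvStepA cl.1) d) d).keys =
        PySem.Set.update d.keys (data.flatMap (fun cl => cl.2.map Prod.fst)) := by
  induction data with
  | nil => intro d; simp [PySem.Set.update_nil]
  | cons cl t ih =>
    intro d
    simp only [List.foldl_cons, List.flatMap_cons, ih, keys_inner, PySem.Set.update_append]

-- a month absent from the log leaves its column untouched
theorem getD_inner_not_mem (c m : String) (l : List (String × Int)) (hm : m ∉ l.map Prod.fst) :
    ∀ d : PySem.Dict String (PySem.Dict String Int),
      (l.foldl (pvStepA c) d).getD m PySem.Dict.empty = d.getD m PySem.Dict.empty := by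
  induction l with
  | nil => intro d; rfl
  | cons p t ih =>
    intro d
    simp only [List.map_cons, List.mem_cons, not_or] at hm
    simp only [List.foldl_cons, ih hm.2, getD_pvStepA, if_neg hm.1]

-- A's inner loop updates month m's column exactly as a first-match lookup predicts
theorem getD_inner (c m : String) (l : List (String × Int)) (hnd : (l.map Prod.fst).Nodup) :
    ∀ d : PySem.Dict String (PySem.Dict String Int),
      (l.foldl (pvStepA c) d).getD m PySem.Dict.empty =
        (match (PySem.Dict.mk l).get? m with
          | some v => (d.getD m PySem.Dict.empty).insert c v
          | none => d.getD m PySem.Dict.empty) := by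
  induction l with
  | nil => intro d; simp [PySem.Dict.get?]
  | cons p t ih =>
    intro d
    simp only [List.map_cons, List.nodup_cons] at hnd
    rw [List.foldl_cons, PySem.Dict.get?_mk_cons]
    by_cases hm : m = p.1
    · simp only [hm]
      rw [if_pos (by simp), getD_inner_not_mem _ _ _ hnd.1, getD_pvStepA, if_pos rfl]
    · have hne : (p.1 == m) = false := by
        simp only [beq_eq_false_iff_ne]; exact fun h => hm h.symm
      simp only [hne, Bool.false_eq_true, if_false]
      rw [ih hnd.2, getD_pvStepA, if_neg hm]

-- A's whole fold computes each month's column as a fold of inserts over pvSel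
theorem getD_outer (m : String) (data : List (String × List (String × Int)))
    (hnd : ∀ p ∈ data, (p.2.map Prod.fst).Nodup) :
    ∀ d : PySem.Dict String (PySem.Dict String Int),
      (data.foldl (fun d cl => cl.2.foldl (pvStepA cl.1) d) d).getD m PySem.Dict.empty =
        (pvSel data m).foldl (fun inner p => inner.insert p.1 p.2)
          (d.getD m PySem.Dict.empty) := by
  induction data with
  | nil => intro d; rfl
  | cons cl t ih =>
    intro d
    have hcl := hnd cl (by simp)
    have ht : ∀ p ∈ t, (p.2.map Prod.fst).Nodup := fun p hp => hnd p (by simp [hp])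
    rw [List.foldl_cons, ih ht, getD_inner cl.1 m cl.2 hcl d]
    simp only [pvSel, List.filterMap_cons]
    cases h : (PySem.Dict.mk cl.2).get? m with
    | none => simp
    | some v => simp

-- the county names pvSel selects form a sublist of all county names
theorem pvSel_fst_sublist (data : List (String × List (String × Int))) (m : String) :
    ((pvSel data m).map Prod.fst).Sublist (data.map Prod.fst) := by
  induction data with
  | nil => simp [pvSel]
  | cons cl t ih =>
    rw [pvSel, List.filterMap_cons]
    cases h : (PySem.Dict.mk cl.2).get? m with
    | none => exact List.Sublist.cons _ ih
    | some v =>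
      simp only [Option.map_some, List.map_cons]
      exact List.Sublist.cons₂ cl.1 ih

-- folding inserts of fresh distinct keys from the empty dict just lists the pairs
theorem items_fold_insert (sel : List (String × Int)) (hnd : (sel.map Prod.fst).Nodup) :
    (sel.foldl (fun inner p => inner.insert p.1 p.2)
        (PySem.Dict.empty : PySem.Dict String Int)).items = sel := by
  have h := PySem.Dict.items_foldl_insert_fresh (l := sel) (k := Prod.fst) (v := Prod.snd)
    (d := PySem.Dict.empty) (fun a _ => PySem.Dict.contains_empty _) hnd
  simpa using h

-- ===== VERDICT (by name: the statement is the Claim_ definition above) =====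
theorem getMonthlyCases_spec : Claim_equal_getMonthlyCases := by
  intro data _ hpre
  unfold Spec_getMonthlyCases
  simp only [getMonthlyCases, getMonthlyCases_alt]
  have hkeys : (data.foldl (fun d cl => cl.2.foldl (pvStepA cl.1) d)
      PySem.Dict.empty).keys
      = PySem.List.dedup (data.flatMap (fun cl => cl.2.map Prod.fst)) := by
    rw [keys_outer, PySem.List.dedup_eq_ofList]
    simp [PySem.Dict.keys_empty, PySem.Set.update_nil_left]
  have hknd : (data.foldl (fun d cl => cl.2.foldl (pvStepA cl.1) d)
      PySem.Dict.empty).keys.Nodup := by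
    rw [hkeys, PySem.List.dedup_eq_ofList]; exact PySem.Set.nodup_ofList _
  rw [PySem.Dict.items_eq_map_keys _ hknd PySem.Dict.empty, List.map_map, hkeys]
  refine List.map_congr_left (fun m _ => ?_)
  simp only [Function.comp_apply]
  rw [getD_outer m data hpre.2, PySem.Dict.getD_empty,
    items_fold_insert _ (List.Nodup.sublist (pvSel_fst_sublist data m) hpre.1)]
  rfl
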